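-- pv_equiv track=rewrite | github.com/DavitBakh/Python-Final-project | src/utils.py | get_ship_coords
-- ===== SOURCE A (Python) =====
-- BOARD_SIZE = 10
--
-- def get_ship_coords(size: int, x: int, y: int, direction: str):
--
--     dx = dy = 0
--     if direction == "u":
--         dy = -1
--     elif direction == "d":
--         dy = 1
--     elif direction == "r":
--         dx = 1
--     elif direction == "l":
--         dx = -1
--
--
--     coords = []
--     for i in range(size):
--         cx = x  + dx * i
--         cy = y  + dy * i
--
--         if cx < 0 or cx >= BOARD_SIZE or cy < 0 or cy >= BOARD_SIZE:
--             return None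
--
--         coords.append((cx, cy))
--     return coords
-- ===== SOURCE B (Python) =====
-- BOARD_SIZE = 10
--
-- _DIRS = {"u": (0, -1), "d": (0, 1), "r": (1, 0), "l": (-1, 0)}
--
--
-- def get_ship_coords(size: int, x: int, y: int, direction: str):
--     dx, dy = _DIRS.get(direction, (0, 0))
--     if size <= 0:
--         return []
--     ex, ey = x + dx * (size - 1), y + dy * (size - 1)
--     if not (0 <= x < BOARD_SIZE and 0 <= y < BOARD_SIZE
--             and 0 <= ex < BOARD_SIZE and 0 <= ey < BOARD_SIZE):
--         return None
--     return [(x + dx * i, y + dy * i) for i in range(size)]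
-- ===== Notes on version B (the rewrite author's own statement) =====
-- stated objective: alternative
-- what changed: B replaces A's per-cell bounds check with an O(1) test of only the two endpoint cells (valid since the cells are colinear with unit step), looks dx,dy up in a direction table instead of an if-chain, and builds the list in one comprehension with no early return.
import Mathlib
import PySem

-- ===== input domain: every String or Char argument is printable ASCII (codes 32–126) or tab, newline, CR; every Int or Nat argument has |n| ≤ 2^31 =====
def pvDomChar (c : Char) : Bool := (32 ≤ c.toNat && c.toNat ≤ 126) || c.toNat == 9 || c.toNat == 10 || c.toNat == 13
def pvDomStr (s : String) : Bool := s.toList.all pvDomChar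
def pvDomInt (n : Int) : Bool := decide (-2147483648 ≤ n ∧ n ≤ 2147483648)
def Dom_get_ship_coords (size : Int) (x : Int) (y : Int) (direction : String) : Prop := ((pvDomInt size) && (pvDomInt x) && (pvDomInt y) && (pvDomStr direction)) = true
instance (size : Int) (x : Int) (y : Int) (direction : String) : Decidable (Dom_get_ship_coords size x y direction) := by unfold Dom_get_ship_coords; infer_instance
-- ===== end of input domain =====

-- B replaces A's per-cell bounds check with a test of the two endpoint cells only
-- (valid since the cells are colinear with unit step) and builds the list in one map; same O(size) cost.

-- ===== PORT A =====
-- A's for-loop with its early `return None`: recursion over the range list, same coords accumulator.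
def pvALoop (dx dy x y : Int) : List Int → List (Int × Int) → Option (List (Int × Int))
  | [], coords => some coords
  | i :: rest, coords =>
    let cx := x + dx * i
    let cy := y + dy * i
    if cx < 0 ∨ cx ≥ 10 ∨ cy < 0 ∨ cy ≥ 10 then none
    else pvALoop dx dy x y rest (coords ++ [(cx, cy)])

def get_ship_coords (size : Int) (x : Int) (y : Int) (direction : String) : Option (List (Int × Int)) :=
  let dxy : Int × Int :=
    if direction == "u" then (0, -1)
    else if direction == "d" then (0, 1)
    else if direction == "r" then (1, 0)
    else if direction == "l" then (-1, 0)
    else (0, 0)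
  pvALoop dxy.1 dxy.2 x y (PySem.List.pyRange 0 size 1) []

-- ===== PORT B =====
def pvDirs : PySem.Dict String (Int × Int) :=
  PySem.Dict.ofList [("u", (0, -1)), ("d", (0, 1)), ("r", (1, 0)), ("l", (-1, 0))]

def get_ship_coords_alt (size : Int) (x : Int) (y : Int) (direction : String) : Option (List (Int × Int)) :=
  let dxy := PySem.Dict.getD pvDirs direction (0, 0)
  if size ≤ 0 then some []
  else
    let ex := x + dxy.1 * (size - 1)
    let ey := y + dxy.2 * (size - 1)
    if ¬ (0 ≤ x ∧ x < 10 ∧ 0 ≤ y ∧ y < 10 ∧ 0 ≤ ex ∧ ex < 10 ∧ 0 ≤ ey ∧ ey < 10) then none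
    else some ((PySem.List.pyRange 0 size 1).map (fun i => (x + dxy.1 * i, y + dxy.2 * i)))

-- ===== PRECONDITION & SPEC =====
def Spec_get_ship_coords (size : Int) (x : Int) (y : Int) (direction : String) (out : Option (List (Int × Int))) : Prop := out = get_ship_coords_alt size x y direction
instance (size : Int) (x : Int) (y : Int) (direction : String) (out : Option (List (Int × Int))) : Decidable (Spec_get_ship_coords size x y direction out) := by unfold Spec_get_ship_coords; infer_instance

-- ===== CLAIM (what is proved, stated in full; the proofs are below) =====
def Claim_equal_get_ship_coords : Prop := ∀ (size : Int) (x : Int) (y : Int) (direction : String), Dom_get_ship_coords size x y direction → Spec_get_ship_coords size x y direction (get_ship_coords size x y direction)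

-- ===== LEMMAS AND PROOFS =====

-- Characterisation of A's loop: none iff some cell of the range is off-board, else the mapped list.
lemma pvALoop_eq (dx dy x y : Int) (l : List Int) (acc : List (Int × Int)) :
    pvALoop dx dy x y l acc =
      if ∀ i ∈ l, ¬ (x + dx * i < 0 ∨ x + dx * i ≥ 10 ∨ y + dy * i < 0 ∨ y + dy * i ≥ 10)
      then some (acc ++ l.map (fun i => (x + dx * i, y + dy * i)))
      else none := by
  induction l generalizing acc with
  | nil => simp [pvALoop]
  | cons i rest ih =>
    simp only [pvALoop]
    by_cases h : x + dx * i < 0 ∨ x + dx * i ≥ 10 ∨ y + dy * i < 0 ∨ y + dy * i ≥ 10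
    · rw [if_pos h, if_neg]
      intro hall
      exact hall i (List.mem_cons_self) h
    · rw [if_neg h, ih]
      by_cases hr : ∀ j ∈ rest, ¬ (x + dx * j < 0 ∨ x + dx * j ≥ 10 ∨ y + dy * j < 0 ∨ y + dy * j ≥ 10)
      · rw [if_pos hr, if_pos]
        · simp
        · intro j hj
          rcases List.mem_cons.1 hj with rfl | hj'
          · exact h
          · exact hr j hj'
      · rw [if_neg hr, if_neg]
        intro hall
        exact hr fun j hj => hall j (List.mem_cons_of_mem _ hj)

-- Core equivalence with the step vector abstracted: A's loop vs B's endpoint test,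
-- for every step vector the direction table can produce.
lemma pvCore (size x y dx dy : Int)
    (hc : ((dx, dy) = ((0 : Int), (-1 : Int)) ∨ (dx, dy) = (0, 1) ∨ (dx, dy) = (1, 0) ∨
           (dx, dy) = (-1, 0) ∨ (dx, dy) = (0, 0))) :
    pvALoop dx dy x y (PySem.List.pyRange 0 size 1) [] =
      (if size ≤ 0 then some ([] : List (Int × Int))
       else
        if ¬ (0 ≤ x ∧ x < 10 ∧ 0 ≤ y ∧ y < 10 ∧ 0 ≤ x + dx * (size - 1) ∧ x + dx * (size - 1) < 10 ∧
              0 ≤ y + dy * (size - 1) ∧ y + dy * (size - 1) < 10) then none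
        else some ((PySem.List.pyRange 0 size 1).map (fun i => (x + dx * i, y + dy * i)))) := by
  by_cases hs : size ≤ 0
  · rw [if_pos hs, PySem.List.pyRange_one_eq_nil (by omega)]
    simp [pvALoop]
  · rw [if_neg hs, pvALoop_eq]
    have hmem : ∀ i : Int, i ∈ PySem.List.pyRange 0 size 1 ↔ 0 ≤ i ∧ i < size := by
      intro i
      simpa using PySem.List.mem_pyRange_one (a := 0) (b := size) (x := i)
    have hiff : (∀ i ∈ PySem.List.pyRange 0 size 1,
        ¬ (x + dx * i < 0 ∨ x + dx * i ≥ 10 ∨ y + dy * i < 0 ∨ y + dy * i ≥ 10)) ↔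
        (0 ≤ x ∧ x < 10 ∧ 0 ≤ y ∧ y < 10 ∧ 0 ≤ x + dx * (size - 1) ∧ x + dx * (size - 1) < 10 ∧
         0 ≤ y + dy * (size - 1) ∧ y + dy * (size - 1) < 10) := by
      constructor
      · intro hall
        have h0 := hall 0 ((hmem 0).2 (by omega))
        have he := hall (size - 1) ((hmem (size - 1)).2 (by omega))
        simp only [mul_zero, add_zero] at h0
        push_neg at h0 he
        omega
      · intro hend i hi
        rw [hmem] at hi
        rcases hc with h | h | h | h | h <;>
          · obtain ⟨h1, h2⟩ := Prod.mk.injEq .. ▸ h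
            subst h1; subst h2
            push_neg
            omega
    by_cases hall : ∀ i ∈ PySem.List.pyRange 0 size 1,
        ¬ (x + dx * i < 0 ∨ x + dx * i ≥ 10 ∨ y + dy * i < 0 ∨ y + dy * i ≥ 10)
    · rw [if_pos hall, if_neg (by simpa using hiff.1 hall)]
      simp
    · rw [if_neg hall, if_pos (by simpa using fun h => hall (hiff.2 h))]

-- A's if-chain and B's table lookup pick the same (dx, dy).
lemma pvDxy_eq (direction : String) :
    (if direction == "u" then ((0 : Int), (-1 : Int))
     else if direction == "d" then (0, 1)
     else if direction == "r" then (1, 0)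
     else if direction == "l" then (-1, 0)
     else (0, 0)) = PySem.Dict.getD pvDirs direction (0, 0) := by
  by_cases h1 : direction = "u"
  · subst h1; decide
  by_cases h2 : direction = "d"
  · subst h2; decide
  by_cases h3 : direction = "r"
  · subst h3; decide
  by_cases h4 : direction = "l"
  · subst h4; decide
  · simp [pvDirs, PySem.Dict.getD, PySem.Dict.get?, PySem.Dict.ofList, PySem.Dict.update,
      PySem.Dict.insert, PySem.Dict.empty, h1, h2, h3, h4, Ne.symm h1, Ne.symm h2, Ne.symm h3, Ne.symm h4]

lemma pvDxy_cases (direction : String) :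
    PySem.Dict.getD pvDirs direction ((0 : Int), (0 : Int)) = (0, -1) ∨
    PySem.Dict.getD pvDirs direction ((0 : Int), (0 : Int)) = (0, 1) ∨
    PySem.Dict.getD pvDirs direction ((0 : Int), (0 : Int)) = (1, 0) ∨
    PySem.Dict.getD pvDirs direction ((0 : Int), (0 : Int)) = (-1, 0) ∨
    PySem.Dict.getD pvDirs direction ((0 : Int), (0 : Int)) = (0, 0) := by
  rw [← pvDxy_eq]
  by_cases h1 : direction == "u" <;> by_cases h2 : direction == "d" <;>
    by_cases h3 : direction == "r" <;> by_cases h4 : direction == "l" <;>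
    simp [h1, h2, h3, h4]

-- ===== VERDICT (by name: the statement is the Claim_ definition above) =====
theorem get_ship_coords_spec : Claim_equal_get_ship_coords := by
  intro size x y direction _
  unfold Spec_get_ship_coords get_ship_coords get_ship_coords_alt
  rw [pvDxy_eq]
  exact pvCore size x y _ _ (by simpa using pvDxy_cases direction)
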